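-- pv_equiv track=rewrite | github.com/nastyh/LeetCode | Basic Data Structures/max_balanced_subsequence_score.py | maxBalancedSubsequenceScore_dp
-- ===== SOURCE A (Python) =====
-- def maxBalancedSubsequenceScore_dp(stockPrice):
--     """
--     O(n) both
--     """
--     n = len(stockPrice)
--     dp = [0] * n
--     best_sum = {}
--
--     for i in range(n):
--         diff = stockPrice[i] - i
--         if diff in best_sum:
--             dp[i] = best_sum[diff] + stockPrice[i]
--         else:
--             dp[i] = stockPrice[i]
--
--         best_sum[diff] = max(best_sum.get(diff, 0), dp[i])
--
--     return max(dp)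
-- ===== SOURCE B (Python) =====
-- def maxBalancedSubsequenceScore_dp(stockPrice):
--     # Closed form per group (diff = price - index): the best balanced-subsequence
--     # score within a group is the sum of its positive elements if it has one,
--     # otherwise its maximum element. No DP recurrence is needed.
--     pos = {}
--     mx = {}
--     for i, p in enumerate(stockPrice):
--         d = p - i
--         pos[d] = pos.get(d, 0) + max(p, 0)
--         mx[d] = max(mx.get(d, p), p)
--     return max(pos[d] if pos[d] > 0 else mx[d] for d in pos)
-- ===== Notes on version B (the rewrite author's own statement) =====
-- stated objective: alternative
-- what changed: A runs the per-index DP recurrence dp[i] = max-so-far-in-group + price with a best-per-diff hashmap; B dispenses with the DP entirely and uses a closed form: per diff-group it accumulates only the sum of positive elements and the maximum element, the group's answer being the positive sum if positive, else the maximum element.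
-- outside the precondition, e.g. on maxBalancedSubsequenceScore_dp([]): A raises ValueError, B raises ValueError
import Mathlib
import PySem

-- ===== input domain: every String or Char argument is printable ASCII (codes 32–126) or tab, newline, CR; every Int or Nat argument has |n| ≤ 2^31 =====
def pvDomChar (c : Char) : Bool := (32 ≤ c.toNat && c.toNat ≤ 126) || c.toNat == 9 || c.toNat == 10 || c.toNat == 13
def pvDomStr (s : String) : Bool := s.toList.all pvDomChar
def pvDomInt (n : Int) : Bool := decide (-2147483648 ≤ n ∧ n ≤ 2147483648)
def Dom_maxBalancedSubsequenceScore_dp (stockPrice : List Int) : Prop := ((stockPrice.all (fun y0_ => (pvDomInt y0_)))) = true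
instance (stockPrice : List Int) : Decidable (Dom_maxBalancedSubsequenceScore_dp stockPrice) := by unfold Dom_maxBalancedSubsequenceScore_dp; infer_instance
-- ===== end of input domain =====

-- B replaces A's per-index DP recurrence by a closed form per diff-group (sum of the
-- group's positive elements if positive, else its maximum element); objective: alternative.


-- ===== PORT A =====
-- A's `for i in range(n)` reading stockPrice[i] is ported as a fold over
-- PySem.List.enumerate stockPrice (the same iterations, with the same (i, stockPrice[i])
-- pairs in the same order — exact); `dp[i] = v` writes the indices 0..n-1 in order into a
-- list of length n, so the dp list is built by appending v at the current position.
def pvStepA (st : List Int × PySem.Dict Int Int) (ip : Int × Int) : List Int × PySem.Dict Int Int :=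
  let i := ip.1
  let price := ip.2
  let diff := price - i
  let dpi := match PySem.Dict.get? st.2 diff with       -- `if diff in best_sum`
    | some b => b + price
    | none => price
  (st.1 ++ [dpi], PySem.Dict.insert st.2 diff (max (PySem.Dict.getD st.2 diff 0) dpi))

def maxBalancedSubsequenceScore_dp (stockPrice : List Int) : Int :=
  let res := (PySem.List.enumerate stockPrice).foldl pvStepA ([], PySem.Dict.empty)
  -- `max(dp)`: raises ValueError on an empty list — excluded by Pre_
  (PySem.List.max? res.1 (fun y => y)).getD 0

-- ===== PORT B =====
-- `pos[d] = pos.get(d, 0) + max(p, 0)` and `mx[d] = max(mx.get(d, p), p)` are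
-- Dict.insert of a Dict.getD-based value — exact; the two dicts are one pair state.
def pvStepB (st : PySem.Dict Int Int × PySem.Dict Int Int) (ip : Int × Int) :
    PySem.Dict Int Int × PySem.Dict Int Int :=
  let d := ip.2 - ip.1
  (PySem.Dict.insert st.1 d (PySem.Dict.getD st.1 d 0 + max ip.2 0),
   PySem.Dict.insert st.2 d (max (PySem.Dict.getD st.2 d ip.2) ip.2))

def maxBalancedSubsequenceScore_dp_alt (stockPrice : List Int) : Int :=
  let st := (PySem.List.enumerate stockPrice).foldl pvStepB (PySem.Dict.empty, PySem.Dict.empty)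
  -- `pos[d]` / `mx[d]` inside the generator: d ranges over pos's keys and every such key
  -- is also in mx (both get every diff), so the lookups always hit — getD 0 is exact here.
  let cands := (PySem.Dict.keys st.1).map
    (fun d => if 0 < PySem.Dict.getD st.1 d 0 then PySem.Dict.getD st.1 d 0
              else PySem.Dict.getD st.2 d 0)
  -- `max(...)`: raises ValueError on an empty generator — excluded by Pre_
  (PySem.List.max? cands (fun y => y)).getD 0

-- ===== PRECONDITION & SPEC =====
-- On [] both programs raise ValueError at max(); Pre_ excludes exactly that input.
def Pre_maxBalancedSubsequenceScore_dp (stockPrice : List Int) : Prop := stockPrice ≠ []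
instance (stockPrice : List Int) : Decidable (Pre_maxBalancedSubsequenceScore_dp stockPrice) := by unfold Pre_maxBalancedSubsequenceScore_dp; infer_instance

def pvWitness_maxBalancedSubsequenceScore_dp : List Int := [3, -1, 4, 2, 2]

def Spec_maxBalancedSubsequenceScore_dp (stockPrice : List Int) (out : Int) : Prop := out = maxBalancedSubsequenceScore_dp_alt stockPrice
instance (stockPrice : List Int) (out : Int) : Decidable (Spec_maxBalancedSubsequenceScore_dp stockPrice out) := by unfold Spec_maxBalancedSubsequenceScore_dp; infer_instance

-- ===== CLAIM =====
def Claim_equal_maxBalancedSubsequenceScore_dp : Prop := ∀ (stockPrice : List Int), Dom_maxBalancedSubsequenceScore_dp stockPrice → Pre_maxBalancedSubsequenceScore_dp stockPrice → Spec_maxBalancedSubsequenceScore_dp stockPrice (maxBalancedSubsequenceScore_dp stockPrice)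

-- ===== LEMMAS AND PROOFS =====

-- Reference notions used only by the proofs.
-- prices (in order) of the entries of l whose key (price - index) is d
def pvGrp (d : Int) (l : List (Int × Int)) : List Int :=
  (l.filter (fun ip => ip.2 - ip.1 == d)).map (·.2)

-- A's per-group dp values, starting from best-so-far b
def pvScan (b : Int) : List Int → List Int
  | [] => []
  | p :: t => (b + p) :: pvScan (max b (b + p)) t

-- A's per-group best-so-far after a group
def pvBest (b : Int) (l : List Int) : Int := l.foldl (fun b p => max b (b + p)) b

-- B's closed form
def pvSumPos : List Int → Int
  | [] => 0
  | p :: t => max p 0 + pvSumPos t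

def pvMaxE : List Int → Int
  | [] => 0
  | [p] => p
  | p :: q :: t => max p (pvMaxE (q :: t))

def pvCF (g : List Int) : Int := if 0 < pvSumPos g then pvSumPos g else pvMaxE g

theorem pvGrp_append_singleton (d : Int) (l : List (Int × Int)) (ip : Int × Int) :
    pvGrp d (l ++ [ip]) = pvGrp d l ++ (if ip.2 - ip.1 = d then [ip.2] else []) := by
  simp [pvGrp, List.filter_append]
  split_ifs with h <;> simp [h]

theorem pvBest_append_singleton (b : Int) (l : List Int) (p : Int) :
    pvBest b (l ++ [p]) = max (pvBest b l) (pvBest b l + p) := by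
  simp [pvBest, List.foldl_append]

theorem pvScan_append_singleton (b : Int) (l : List Int) (p : Int) :
    pvScan b (l ++ [p]) = pvScan b l ++ [pvBest b l + p] := by
  induction l generalizing b with
  | nil => simp [pvScan, pvBest]
  | cons q t ih => simp [pvScan, ih, pvBest, List.foldl_cons]

-- ===== A-side invariant =====
theorem pvEA_inv (l : List (Int × Int)) :
    (∀ d, PySem.Dict.getD (l.foldl pvStepA ([], PySem.Dict.empty)).2 d 0 = pvBest 0 (pvGrp d l))
    ∧ (l.foldl pvStepA ([], PySem.Dict.empty)).1.length = l.length
    ∧ (∀ x, x ∈ (l.foldl pvStepA ([], PySem.Dict.empty)).1 ↔ ∃ d, x ∈ pvScan 0 (pvGrp d l)) := by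
  induction l using List.reverseRecOn with
  | nil =>
    refine ⟨fun d => ?_, rfl, fun x => ?_⟩
    · simp [pvGrp, pvBest, PySem.Dict.getD_empty]
    · simp [pvGrp, pvScan]
  | append_singleton l ip ih =>
    obtain ⟨hD, hLen, hMem⟩ := ih
    have hstep : ((l ++ [ip]).foldl pvStepA ([], PySem.Dict.empty)) =
        pvStepA (l.foldl pvStepA ([], PySem.Dict.empty)) ip := by
      simp [List.foldl_append]
    set st := l.foldl pvStepA ([], PySem.Dict.empty) with hst
    have hdpi : (match PySem.Dict.get? st.2 (ip.2 - ip.1) with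
        | some b => b + ip.2 | none => ip.2) = pvBest 0 (pvGrp (ip.2 - ip.1) l) + ip.2 := by
      rw [← hD (ip.2 - ip.1)]
      rcases hget : PySem.Dict.get? st.2 (ip.2 - ip.1) with _ | b
      · simp [PySem.Dict.getD_eq_get?_getD, hget]
      · simp [PySem.Dict.getD_eq_get?_getD, hget]
    have hstep' : ((l ++ [ip]).foldl pvStepA ([], PySem.Dict.empty)) =
        (st.1 ++ [pvBest 0 (pvGrp (ip.2 - ip.1) l) + ip.2],
         PySem.Dict.insert st.2 (ip.2 - ip.1)
           (max (PySem.Dict.getD st.2 (ip.2 - ip.1) 0)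
                (pvBest 0 (pvGrp (ip.2 - ip.1) l) + ip.2))) := by
      rw [hstep]; simp only [pvStepA, hdpi]
    refine ⟨fun d => ?_, by simp [hstep', hLen], fun x => ?_⟩
    · rw [hstep']
      by_cases h : d = ip.2 - ip.1
      · subst h
        rw [PySem.Dict.getD_insert_self, hD, pvGrp_append_singleton]
        simp [pvBest_append_singleton]
      · dsimp only
        rw [PySem.Dict.getD_insert_of_ne _ _ _ h, hD, pvGrp_append_singleton]
        simp [Ne.symm h]
    · rw [hstep']
      simp only [List.mem_append, List.mem_singleton]
      constructor
      · rintro (hx | hx)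
        · obtain ⟨d, hd⟩ := (hMem x).mp hx
          refine ⟨d, ?_⟩
          rw [pvGrp_append_singleton]
          by_cases h : ip.2 - ip.1 = d
          · simp [h, pvScan_append_singleton]; left; exact hd
          · simp [h]; exact hd
        · exact ⟨ip.2 - ip.1, by
            rw [pvGrp_append_singleton]
            simp [pvScan_append_singleton, hx]⟩
      · rintro ⟨d, hd⟩
        rw [pvGrp_append_singleton] at hd
        by_cases h : ip.2 - ip.1 = d
        · rw [if_pos h, pvScan_append_singleton] at hd
          rcases List.mem_append.mp hd with hx | hx
          · exact Or.inl ((hMem x).mpr ⟨d, hx⟩)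
          · subst h; simp at hx; exact Or.inr hx
        · rw [if_neg h, List.append_nil] at hd
          exact Or.inl ((hMem x).mpr ⟨d, hd⟩)

-- ===== closed-form mathematics =====
theorem pvSumPos_nonneg (l : List Int) : 0 ≤ pvSumPos l := by
  induction l with
  | nil => simp [pvSumPos]
  | cons p t ih => simp only [pvSumPos]; omega

theorem pvMaxE_cons (p : Int) (t : List Int) (ht : t ≠ []) :
    pvMaxE (p :: t) = max p (pvMaxE t) := by
  cases t with
  | nil => exact absurd rfl ht
  | cons q s => rfl

theorem pvMaxE_le_sumPos (l : List Int) (hl : l ≠ []) : pvMaxE l ≤ pvSumPos l := by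
  induction l with
  | nil => exact absurd rfl hl
  | cons p t ih =>
    cases t with
    | nil => simp only [pvMaxE, pvSumPos]; omega
    | cons q s =>
      have h := ih (by simp)
      have hn := pvSumPos_nonneg (q :: s)
      have hgoal : pvSumPos (p :: q :: s) = max p 0 + pvSumPos (q :: s) := rfl
      rw [pvMaxE_cons p (q :: s) (by simp), hgoal]
      omega

theorem pvCF_cons (p : Int) (t : List Int) (ht : t ≠ []) :
    (pvCF (p :: t) = p ∨ pvCF (p :: t) = max p 0 + pvCF t)
    ∧ p ≤ pvCF (p :: t) ∧ max p 0 + pvCF t ≤ pvCF (p :: t) := by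
  have hS : 0 ≤ pvSumPos t := pvSumPos_nonneg t
  have hM : pvMaxE t ≤ pvSumPos t := pvMaxE_le_sumPos t ht
  have hcons : pvSumPos (p :: t) = max p 0 + pvSumPos t := rfl
  have hmax : pvMaxE (p :: t) = max p (pvMaxE t) := pvMaxE_cons p t ht
  unfold pvCF
  rw [hcons, hmax]
  rcases max_choice p (pvMaxE t) with h | h <;> split_ifs <;> omega

theorem pvCF_singleton (p : Int) : pvCF [p] = p := by
  unfold pvCF; simp only [pvSumPos, pvMaxE]; split_ifs <;> omega

-- the closed form is attained by A's dp scan and bounds it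
theorem pvScan_cf (l : List Int) (hl : l ≠ []) (b : Int) :
    (b + pvCF l) ∈ pvScan b l ∧ ∀ x ∈ pvScan b l, x ≤ b + pvCF l := by
  induction l generalizing b with
  | nil => exact absurd rfl hl
  | cons p t ih =>
    cases t with
    | nil =>
      rw [pvCF_singleton]
      simp [pvScan]
    | cons q s =>
      have ht : (q :: s) ≠ [] := by simp
      have hshift : max b (b + p) = b + max p 0 := by omega
      obtain ⟨hmem, hub⟩ := ih ht (b + max p 0)
      obtain ⟨hch, hp, hbd⟩ := pvCF_cons p (q :: s) ht
      constructor
      · rcases hch with h | h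
        · rw [h]; exact List.mem_cons_self
        · rw [h]
          exact List.mem_cons_of_mem _ (by rw [pvScan, hshift] at *; rw [← add_assoc]; exact hmem)
      · intro x hx
        rw [pvScan, hshift] at hx
        rcases List.mem_cons.mp hx with h | h
        · omega
        · have := hub x h; omega

-- ===== B-side invariants =====
theorem pvSumPos_append_singleton (l : List Int) (p : Int) :
    pvSumPos (l ++ [p]) = pvSumPos l + max p 0 := by
  induction l with
  | nil => simp [pvSumPos]
  | cons q t ih => simp only [List.cons_append, pvSumPos, ih]; omega

theorem pvMaxE_append_singleton (l : List Int) (p : Int) :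
    pvMaxE (l ++ [p]) = if l = [] then p else max (pvMaxE l) p := by
  induction l with
  | nil => simp [pvMaxE]
  | cons q t ih =>
    rw [List.cons_append, pvMaxE_cons q (t ++ [p]) (by simp), ih]
    cases t with
    | nil => simp [pvMaxE]
    | cons r s =>
      rw [if_neg (by simp), if_neg (by simp), pvMaxE_cons q (r :: s) (by simp)]
      omega

def pvPosStep (dct : PySem.Dict Int Int) (ip : Int × Int) : PySem.Dict Int Int :=
  PySem.Dict.insert dct (ip.2 - ip.1) (PySem.Dict.getD dct (ip.2 - ip.1) 0 + max ip.2 0)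

def pvMxStep (dct : PySem.Dict Int Int) (ip : Int × Int) : PySem.Dict Int Int :=
  PySem.Dict.insert dct (ip.2 - ip.1) (max (PySem.Dict.getD dct (ip.2 - ip.1) ip.2) ip.2)

def pvPosFold (e : List (Int × Int)) : PySem.Dict Int Int := e.foldl pvPosStep PySem.Dict.empty

def pvMxFold (e : List (Int × Int)) : PySem.Dict Int Int := e.foldl pvMxStep PySem.Dict.empty

theorem pvStepB_fold_gen (e : List (Int × Int)) (a b : PySem.Dict Int Int) :
    e.foldl pvStepB (a, b) = (e.foldl pvPosStep a, e.foldl pvMxStep b) := by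
  induction e generalizing a b with
  | nil => rfl
  | cons ip t ih =>
    rw [List.foldl_cons, List.foldl_cons, List.foldl_cons]
    exact ih _ _

theorem pvStepB_fold (e : List (Int × Int)) :
    e.foldl pvStepB (PySem.Dict.empty, PySem.Dict.empty) = (pvPosFold e, pvMxFold e) :=
  pvStepB_fold_gen e PySem.Dict.empty PySem.Dict.empty

theorem pvPosFold_getD (e : List (Int × Int)) (d : Int) :
    PySem.Dict.getD (pvPosFold e) d 0 = pvSumPos (pvGrp d e) := by
  induction e using List.reverseRecOn with
  | nil => simp [pvPosFold, pvGrp, pvSumPos]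
  | append_singleton l ip ih =>
    rw [pvPosFold, List.foldl_append, List.foldl_cons, List.foldl_nil,
      show l.foldl pvPosStep PySem.Dict.empty = pvPosFold l from rfl, pvPosStep,
      PySem.Dict.getD_insert, pvGrp_append_singleton]
    by_cases h : d = ip.2 - ip.1
    · rw [if_pos h, ← h, ih]
      simp [pvSumPos_append_singleton]
    · rw [if_neg h, ih, if_neg (fun hh => h hh.symm), List.append_nil]

theorem pvMxFold_getD (e : List (Int × Int)) (d : Int) (d0 : Int) :
    PySem.Dict.getD (pvMxFold e) d d0
      = if pvGrp d e = [] then d0 else pvMaxE (pvGrp d e) := by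
  induction e using List.reverseRecOn generalizing d0 with
  | nil => simp [pvMxFold, pvGrp]
  | append_singleton l ip ih =>
    rw [pvMxFold, List.foldl_append, List.foldl_cons, List.foldl_nil,
      show l.foldl pvMxStep PySem.Dict.empty = pvMxFold l from rfl, pvMxStep,
      PySem.Dict.getD_insert, pvGrp_append_singleton]
    by_cases h : d = ip.2 - ip.1
    · rw [if_pos h, ← h, ih ip.2]
      by_cases hg : pvGrp d l = []
      · simp [hg, pvMaxE]
      · simp [hg, pvMaxE_append_singleton]
    · rw [if_neg h, ih d0,
        if_neg (show ¬(ip.2 - ip.1 = d) from fun hh => h hh.symm), List.append_nil]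

theorem pvPosFold_keys_mem (e : List (Int × Int)) (d : Int) :
    d ∈ PySem.Dict.keys (pvPosFold e) ↔ d ∈ e.map (fun ip => ip.2 - ip.1) := by
  rw [pvPosFold,
    show pvPosStep = (fun dct (ip : Int × Int) => PySem.Dict.insert dct (ip.2 - ip.1)
      (PySem.Dict.getD dct (ip.2 - ip.1) 0 + max ip.2 0)) from rfl,
    PySem.Dict.keys_foldl_insert_key e (fun ip => ip.2 - ip.1)
      (fun dct ip => PySem.Dict.getD dct (ip.2 - ip.1) 0 + max ip.2 0) PySem.Dict.empty,
    PySem.Dict.keys_empty, PySem.Set.update_nil_left]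
  exact PySem.Set.mem_ofList _ d

theorem pvGrp_ne_nil_iff (d : Int) (e : List (Int × Int)) :
    pvGrp d e ≠ [] ↔ d ∈ e.map (fun ip => ip.2 - ip.1) := by
  constructor
  · intro h
    obtain ⟨p, hp⟩ := List.exists_mem_of_ne_nil _ h
    simp only [pvGrp, List.mem_map, List.mem_filter] at hp
    obtain ⟨ip, ⟨hmem, hkey⟩, _⟩ := hp
    exact List.mem_map.mpr ⟨ip, hmem, by simpa using hkey⟩
  · intro h hnil
    obtain ⟨ip, hmem, hkey⟩ := List.mem_map.mp h
    have : ip.2 ∈ pvGrp d e :=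
      List.mem_map.mpr ⟨ip, List.mem_filter.mpr ⟨hmem, by simpa using hkey⟩, rfl⟩
    rw [hnil] at this
    exact absurd this List.not_mem_nil

-- B's candidate value at a key with a nonempty group is the closed form
theorem pvCand_eq_cf (e : List (Int × Int)) (d : Int) (hg : pvGrp d e ≠ []) :
    (if 0 < PySem.Dict.getD (pvPosFold e) d 0 then PySem.Dict.getD (pvPosFold e) d 0
     else PySem.Dict.getD (pvMxFold e) d 0) = pvCF (pvGrp d e) := by
  rw [pvPosFold_getD, pvMxFold_getD, if_neg hg, pvCF]

-- max(xs) = max(ys) when ys ⊆ xs and every x ∈ xs is ≤ some y ∈ ys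
theorem pvMax_eq (xs ys : List Int) (hy : ys ≠ [])
    (h1 : ∀ y ∈ ys, y ∈ xs) (h2 : ∀ x ∈ xs, ∃ y ∈ ys, x ≤ y) :
    (PySem.List.max? xs (fun y => y)).getD 0 = (PySem.List.max? ys (fun y => y)).getD 0 := by
  have hx : xs ≠ [] := by
    obtain ⟨y, hyy⟩ := List.exists_mem_of_ne_nil _ hy
    exact List.ne_nil_of_mem (h1 y hyy)
  rcases hmx : PySem.List.max? xs (fun y => y) with _ | m
  · exact absurd ((PySem.List.max?_eq_none_iff xs _).mp hmx) hx
  rcases hmy : PySem.List.max? ys (fun y => y) with _ | m'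
  · exact absurd ((PySem.List.max?_eq_none_iff ys _).mp hmy) hy
  simp only [Option.getD_some]
  obtain ⟨y, hyy, hle⟩ := h2 m (PySem.List.max?_mem hmx)
  exact le_antisymm
    (le_trans hle (PySem.List.max?_isMax hmy y hyy))
    (PySem.List.max?_isMax hmx m' (h1 m' (PySem.List.max?_mem hmy)))

-- ===== VERDICT =====
theorem maxBalancedSubsequenceScore_dp_spec : Claim_equal_maxBalancedSubsequenceScore_dp := by
  intro sp _ hpre
  unfold Spec_maxBalancedSubsequenceScore_dp
  unfold maxBalancedSubsequenceScore_dp maxBalancedSubsequenceScore_dp_alt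
  rw [pvStepB_fold]
  obtain ⟨_, hLen, hMem⟩ := pvEA_inv (PySem.List.enumerate sp)
  set e := PySem.List.enumerate sp with he
  set dp := (e.foldl pvStepA ([], PySem.Dict.empty)).1 with hdp
  have hAne : dp ≠ [] := by
    intro h
    rw [h] at hLen
    have hlen : e.length = sp.length := PySem.List.length_enumerate sp 0
    cases sp with
    | nil => exact hpre rfl
    | cons a t => rw [hlen] at hLen; simp at hLen
  apply pvMax_eq
  · -- candidates nonempty
    obtain ⟨x, hx⟩ := List.exists_mem_of_ne_nil _ hAne
    obtain ⟨d, hd⟩ := (hMem x).mp hx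
    have hg : pvGrp d e ≠ [] := by
      intro h; rw [h] at hd; simp [pvScan] at hd
    have hk : d ∈ PySem.Dict.keys (pvPosFold e) :=
      (pvPosFold_keys_mem e d).mpr ((pvGrp_ne_nil_iff d e).mp hg)
    exact List.ne_nil_of_mem (List.mem_map.mpr ⟨d, hk, rfl⟩)
  · -- every candidate is one of A's dp values
    intro y hy
    obtain ⟨d, hk, hfd⟩ := List.mem_map.mp hy
    have hg : pvGrp d e ≠ [] :=
      (pvGrp_ne_nil_iff d e).mpr ((pvPosFold_keys_mem e d).mp hk)
    have hval : y = pvCF (pvGrp d e) := by rw [← hfd, pvCand_eq_cf e d hg]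
    obtain ⟨hmem, _⟩ := pvScan_cf (pvGrp d e) hg 0
    rw [zero_add] at hmem
    exact (hMem y).mpr ⟨d, hval ▸ hmem⟩
  · -- every dp value is ≤ its group's candidate
    intro x hx
    obtain ⟨d, hd⟩ := (hMem x).mp hx
    have hg : pvGrp d e ≠ [] := by
      intro h; rw [h] at hd; simp [pvScan] at hd
    have hk : d ∈ PySem.Dict.keys (pvPosFold e) :=
      (pvPosFold_keys_mem e d).mpr ((pvGrp_ne_nil_iff d e).mp hg)
    obtain ⟨_, hub⟩ := pvScan_cf (pvGrp d e) hg 0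
    refine ⟨_, List.mem_map.mpr ⟨d, hk, rfl⟩, ?_⟩
    rw [pvCand_eq_cf e d hg]
    have := hub x hd
    omega
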